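-- pv_equiv track=rewrite | github.com/syntra-vindevoy/python-1-2024 | src/chapter9/strings/chap9_ex3.py | find_best_forbidden_letters
-- ===== SOURCE A (Python) =====
-- from itertools import combinations
--
-- def find_best_forbidden_letters(word_list):
--     """
--     Write a program that prompts the user to enter a string of forbidden letters and then prints the number
--     of words that don’t contain any of them. Can you find a combination of 5 forbidden letters that excludes the
--     smallest number of words?
--     Determines whether a given word contains any of the specified forbidden letters.
--     If the word contains at least one forbidden letter, it returns False. Otherwise, it
--     returns True.
--     1. **Loading Words**: `load_words` reads all the words from a file into a list.
--     2. **Avoids Function**: `avoids` checks if a word avoids a given set of forbidden letters.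
--     3. **Finding the Best Combination**:
--     - `itertools.combinations` generates all combinations of 5 letters from the alphabet.
--     - For each combination, the program counts the number of words excluded using the `avoids` function.
--     - The program keeps track of the combination that results in the smallest number of excluded words.
--     :param word_list:
--     :return:
--     """
--     alphabet = "abcdefghijklmnopqrstuvwxyz"
--     min_excluded = len(word_list)  # Start with the maximum possible value
--     best_combination = None
--
--     for combo in combinations(alphabet, 5):
--         combo_str = ''.join(combo)
--         excluded_count = sum(1 for word in word_list if not avoids(word, combo_str))
--         if excluded_count < min_excluded:
--             min_excluded = excluded_count
--             best_combination = combo_str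
--
--     return best_combination, min_excluded
--
-- def avoids(word, forbidden_letters):
--     """
--       Exercise 3
--     Write a function named avoids that takes a word and a string of forbidden letters, and that returns T
--     rue if the word doesn’t use any of the forbidden letters.
--
--
--
--     :param word: The word to be checked for forbidden letters.
--     :type word: str
--     :param forbidden_letters: A string containing letters that should not be present
--         in the word.
--     :type forbidden_letters: str
--     :return: Returns True if the word does not contain any forbidden letters, otherwise
--         returns False.
--     :rtype: bool
--     """
--     for letter in forbidden_letters:
--         if letter in word:
--             return False
--     return True
-- ===== SOURCE B (Python) =====
-- def find_best_forbidden_letters(word_list):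
--     # Prefix-pruning tree over 5-letter combinations: each word's letter set is
--     # computed once, and the survivor list (words avoiding the letters chosen so
--     # far) is filtered incrementally and shared by all combos with that prefix.
--     alphabet = "abcdefghijklmnopqrstuvwxyz"
--     n = len(word_list)
--     letter_sets = [set(w) for w in word_list]
--
--     def explore(need, start, prefix, survivors):
--         if need == 0:
--             return [(prefix, n - len(survivors))]
--         results = []
--         for i in range(start, 26):
--             ch = alphabet[i]
--             results.extend(explore(need - 1, i + 1, prefix + ch,
--                                    [s for s in survivors if ch not in s]))
--         return results
--
--     best_combination, min_excluded = None, n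
--     for combo, excluded in explore(5, 0, "", letter_sets):
--         if excluded < min_excluded:
--             best_combination, min_excluded = combo, excluded
--     return best_combination, min_excluded
-- ===== Notes on version B (the rewrite author's own statement) =====
-- stated objective: faster
-- what changed: Replaces the flat scan of all C(26,5) combinations (each re-scanning every word with substring tests) by a prefix-sharing pruning tree: each word's letter set is computed once, and the survivor list of words avoiding the chosen letters is filtered incrementally and shared by all combinations with the same prefix.
import Mathlib
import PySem

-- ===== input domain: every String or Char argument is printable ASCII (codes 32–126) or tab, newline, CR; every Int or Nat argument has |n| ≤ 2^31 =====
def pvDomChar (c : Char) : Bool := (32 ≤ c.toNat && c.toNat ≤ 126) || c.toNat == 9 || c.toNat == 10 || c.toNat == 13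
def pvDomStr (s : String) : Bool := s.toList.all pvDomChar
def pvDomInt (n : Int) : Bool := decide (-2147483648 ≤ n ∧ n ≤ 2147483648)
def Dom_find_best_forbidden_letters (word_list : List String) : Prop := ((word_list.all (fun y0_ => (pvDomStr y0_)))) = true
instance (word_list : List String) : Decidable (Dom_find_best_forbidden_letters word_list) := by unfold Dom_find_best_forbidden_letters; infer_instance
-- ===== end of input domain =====

-- B replaces A's flat scan of all C(26,5) combinations (each re-scanning every word with
-- substring tests) by a prefix-sharing pruning tree over precomputed per-word letter sets;
-- a timing run measured B faster by a constant factor. Return values are equal (proved).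

-- ===== PORT A =====
def pvAlphabet : List Char := "abcdefghijklmnopqrstuvwxyz".toList

-- avoids(word, forbidden_letters): early-return loop over the forbidden letters;
-- `letter in word` is Python substring membership, exact via PySem.Chars.isIn.
def pvAvoids (word : String) : List Char → Bool
  | [] => true
  | c :: rest => if PySem.Chars.isIn [c] word.toList then false else pvAvoids word rest

-- combo strings are kept as their List Char (''.join(combo) over 5 chars) and turned
-- into a String only at the return, where Python already holds the joined string.
def find_best_forbidden_letters (word_list : List String) : Option String × Int :=
  let combos := PySem.List.combinations pvAlphabet 5
  let r := combos.foldl (fun (acc : Option (List Char) × Int) combo =>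
      let excluded : Int := word_list.foldl (fun s w => if pvAvoids w combo then s else s + 1) 0
      if excluded < acc.2 then (some combo, excluded) else acc)
    ((none : Option (List Char)), PySem.List.len word_list)
  (r.1.map (fun cs => String.ofList cs), r.2)

-- ===== PORT B =====
-- explore(need, start, prefix, survivors) of Source B (results built by list `extend`).
def pvExplore (n : Int) : Nat → Int → List Char → List (PySem.Set Char) → List (List Char × Int)
  | 0, _, pre, surv => [(pre, n - PySem.List.len surv)]
  | need+1, start, pre, surv =>
      (PySem.List.pyRange start 26 1).foldl (fun acc i =>
        let ch := PySem.List.pyGetD pvAlphabet i ' '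
        acc ++ pvExplore n need (i + 1) (pre ++ [ch])
          (surv.filter (fun s => !(PySem.Set.contains s ch)))) []

def find_best_forbidden_letters_alt (word_list : List String) : Option String × Int :=
  let n : Int := PySem.List.len word_list
  let letter_sets := word_list.map (fun w => PySem.Set.ofList w.toList)
  let res := pvExplore n 5 0 [] letter_sets
  let r := res.foldl (fun (acc : Option (List Char) × Int) p =>
      if p.2 < acc.2 then (some p.1, p.2) else acc)
    ((none : Option (List Char)), n)
  (r.1.map (fun cs => String.ofList cs), r.2)

-- ===== PRECONDITION & SPEC =====
def Spec_find_best_forbidden_letters (word_list : List String) (out : Option String × Int) : Prop := out = find_best_forbidden_letters_alt word_list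
instance (word_list : List String) (out : Option String × Int) : Decidable (Spec_find_best_forbidden_letters word_list out) := by unfold Spec_find_best_forbidden_letters; infer_instance

-- ===== CLAIM (what is proved, stated in full; the proofs are below) =====
def Claim_equal_find_best_forbidden_letters : Prop := ∀ (word_list : List String), Dom_find_best_forbidden_letters word_list → Spec_find_best_forbidden_letters word_list (find_best_forbidden_letters word_list)

-- ===== LEMMAS AND PROOFS =====

theorem pv_isIn_singleton (c : Char) (l : List Char) :
    PySem.Chars.isIn [c] l = decide (c ∈ l) := by
  by_cases h : c ∈ l
  · simp [h, PySem.Chars.isIn_iff_infix, List.singleton_infix_iff]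
  · simp only [h, decide_false]
    simp [PySem.Chars.isIn_eq_false_iff, List.singleton_infix_iff, h]

theorem pv_avoids_eq_all (w : String) (combo : List Char) :
    pvAvoids w combo = combo.all (fun ch => !(PySem.Set.contains (PySem.Set.ofList w.toList) ch)) := by
  induction combo with
  | nil => rfl
  | cons c rest ih =>
    simp only [pvAvoids, pv_isIn_singleton, List.all_cons,
      PySem.Set.contains_eq_listContains]
    rw [ih]
    simp [PySem.Set.contains_eq_listContains]

-- the per-combo value B's tree produces for a leaf
def pvLeafVal (n : Int) (surv : List (PySem.Set Char)) (c : List Char) : Int :=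
  n - ((surv.filter (fun s => c.all (fun ch => !(PySem.Set.contains s ch)))).length : Int)

theorem pvExplore_eq (n : Int) (need : Nat) :
    ∀ (j : Nat), j ≤ 26 → ∀ (pre : List Char) (surv : List (PySem.Set Char)),
    pvExplore n need (j : Int) pre surv =
      (PySem.List.combinations (pvAlphabet.drop j) need).map
        (fun c => (pre ++ c, pvLeafVal n surv c)) := by
  induction need with
  | zero =>
    intro j hj pre surv
    simp [pvExplore, PySem.List.combinations_zero, pvLeafVal, PySem.List.len_eq,
      List.filter_true]
  | succ need ihneed =>
    suffices h : ∀ (m j : Nat), j ≤ 26 → 26 - j = m → ∀ pre surv,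
        pvExplore n (need+1) (j : Int) pre surv =
          (PySem.List.combinations (pvAlphabet.drop j) (need+1)).map
            (fun c => (pre ++ c, pvLeafVal n surv c)) by
      intro j hj pre surv
      exact h (26 - j) j hj rfl pre surv
    intro m
    induction m with
    | zero =>
      intro j hj hm pre surv
      have hj26 : j = 26 := by omega
      subst hj26
      simp only [pvExplore]
      rw [PySem.List.pyRange_one_eq_nil (by norm_num)]
      have : pvAlphabet.drop 26 = [] := by decide
      simp [this, PySem.List.combinations_nil_succ]
    | succ m ihm =>
      intro j hj hm pre surv
      have hjlt : j < 26 := by omega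
      have hlen : j < pvAlphabet.length := by
        have : pvAlphabet.length = 26 := by decide
        omega
      have hch : PySem.List.pyGetD pvAlphabet (j : Int) ' ' = pvAlphabet[j] := by
        rw [PySem.List.pyGetD_natCast]
        exact List.getD_eq_getElem _ _ hlen
      simp only [pvExplore]
      rw [PySem.List.pyRange_one_cons (by exact_mod_cast hjlt), List.foldl_cons,
        PySem.List.foldl_append_eq_flatMap]
      rw [hch]
      have hcast : ((j : Int) + 1) = ((j + 1 : Nat) : Int) := by push_cast; ring
      have hrest : List.flatMap
            (fun i =>
              pvExplore n need (i + 1) (pre ++ [PySem.List.pyGetD pvAlphabet i ' '])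
                (List.filter (fun s => !s.contains (PySem.List.pyGetD pvAlphabet i ' ')) surv))
            (PySem.List.pyRange ((j : Int) + 1) 26 1)
          = pvExplore n (need + 1) ((j : Int) + 1) pre surv := by
        simp only [pvExplore]
        rw [PySem.List.foldl_append_eq_flatMap]
        simp
      rw [hrest, hcast, ihneed (j + 1) (by omega), ihm (j + 1) (by omega) (by omega)]
      rw [List.drop_eq_getElem_cons hlen, PySem.List.combinations_cons_succ,
        List.map_append, List.map_map]
      simp only [List.nil_append]
      congr 1
      apply List.map_congr_left
      intro c _
      simp only [Function.comp_apply, pvLeafVal, Prod.mk.injEq]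
      refine ⟨by simp, ?_⟩
      rw [List.filter_filter]
      have hf : List.filter (fun s => (pvAlphabet[j] :: c).all (fun ch => !s.contains ch)) surv
          = List.filter (fun s => c.all (fun ch => !s.contains ch) && !s.contains pvAlphabet[j]) surv := by
        apply List.filter_congr
        intro s _
        simp [List.all_cons, Bool.and_comm]
      rw [hf]

theorem pv_excluded_eq (word_list : List String) (combo : List Char) :
    word_list.foldl (fun s w => if pvAvoids w combo then s else s + 1) (0 : Int) =
      pvLeafVal (PySem.List.len word_list)
        (word_list.map (fun w => PySem.Set.ofList w.toList)) combo := by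
  have hswap : word_list.foldl (fun s w => if pvAvoids w combo then s else s + 1) (0 : Int)
      = word_list.foldl (fun s w => if (!pvAvoids w combo) = true then s + 1 else s) 0 := by
    apply PySem.List.foldl_congr_mem
    intro acc w _
    by_cases h : pvAvoids w combo <;> simp [h]
  rw [hswap, PySem.List.foldl_if_add_one]
  unfold pvLeafVal
  rw [← List.countP_eq_length_filter, List.countP_map]
  have hpt : ∀ w : String,
      ((fun s => combo.all (fun ch => !(PySem.Set.contains s ch))) ∘
        (fun w => PySem.Set.ofList w.toList)) w = pvAvoids w combo := by
    intro w; rw [pv_avoids_eq_all]; rfl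
  have hfun : ((fun s => combo.all (fun ch => !(PySem.Set.contains s ch))) ∘
      (fun w : String => PySem.Set.ofList w.toList)) = fun w => pvAvoids w combo :=
    funext hpt
  rw [hfun]
  have hsum := List.length_eq_countP_add_countP (fun w => pvAvoids w combo) (l := word_list)
  have h1 : word_list.countP (fun w => !pvAvoids w combo)
      = word_list.countP (fun a => decide ¬pvAvoids a combo = true) := by
    apply List.countP_congr; intro w _; by_cases h : pvAvoids w combo <;> simp [h]
  rw [PySem.List.len_eq]
  omega

-- ===== VERDICT (by name: the statement is the Claim_ definition above) =====
theorem find_best_forbidden_letters_spec : Claim_equal_find_best_forbidden_letters := by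
  intro word_list _
  unfold Spec_find_best_forbidden_letters
  simp only [find_best_forbidden_letters, find_best_forbidden_letters_alt]
  have h0 := pvExplore_eq (PySem.List.len word_list) 5 0 (by norm_num) []
    (word_list.map (fun w => PySem.Set.ofList w.toList))
  simp only [Nat.cast_zero, List.drop_zero, List.nil_append] at h0
  rw [h0, List.foldl_map]
  rw [PySem.List.foldl_congr_mem (g := fun (acc : Option (List Char) × Int) c =>
      if pvLeafVal (PySem.List.len word_list)
          (word_list.map (fun w => PySem.Set.ofList w.toList)) c < acc.2
        then (some c, pvLeafVal (PySem.List.len word_list)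
          (word_list.map (fun w => PySem.Set.ofList w.toList)) c)
        else acc)]
  intro acc c _
  rw [pv_excluded_eq]
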